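-- pv_equiv track=rewrite | github.com/Revi1337/BaekJoon-Coding-Test | SWEA/D2/1979. 어디에 단어가 들어갈 수 있을까/어디에 단어가 들어갈 수 있을까.py | solution
-- ===== SOURCE A (Python) =====
-- def solution(N, K, board):
--     rev_board = list(map(list, zip(*board)))
--
--     def count(board):
--         counter = 0
--         for line in board:
--             possible = 0
--             for idx in range(N):
--                 if line[idx] == 1:
--                     possible += 1
--                 else:
--                     if possible == K:
--                         counter += 1
--                     possible = 0
--             if possible == K:
--                 counter += 1
--         return counter
--
--     answer = count(board) + count(rev_board)
--     return answer
-- ===== SOURCE B (Python) =====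
-- def solution(N, K, board):
--     def fits(line):
--         total = 0
--         for i in range(N - K + 1):
--             if all(line[i + j] == 1 for j in range(K)) \
--                     and (i == 0 or line[i - 1] != 1) \
--                     and (i + K == N or line[i + K] != 1):
--                 total += 1
--         return total
--
--     return sum(fits(line) for line in board) + sum(fits(col) for col in zip(*board))
-- ===== Notes on version B (the rewrite author's own statement) =====
-- stated objective: alternative
-- what changed: B replaces A's streaming run counter (per-cell 'possible' accumulator with an end-of-run compare) by a direct window scan: for every start position it tests whether the K cells are all 1 and bounded by a border or non-1 cell on each side; Pre_ excludes the inputs where A raises IndexError (rows or column height shorter than N) and the unspecified corners K < 0 (A returns a constant 0, B's scan raises IndexError or counts empty windows) and K = 0 with N < 0 (A counts one empty word per line and row while reading no cell, B returns 0).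
-- outside the precondition, e.g. on solution(-2, 0, [[1, -1, 1]]): A returns 4, B returns 0; on solution(2, -1, [[1, 0], [1, 1]]): A returns 0, B raises IndexError; on solution(2, -1, [[1, 0, 1, 1], [1, 1, 1, 1], [0, 1, 1, 0], [1, 1, 0, 1]]): A returns 0, B returns 8
import Mathlib
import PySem

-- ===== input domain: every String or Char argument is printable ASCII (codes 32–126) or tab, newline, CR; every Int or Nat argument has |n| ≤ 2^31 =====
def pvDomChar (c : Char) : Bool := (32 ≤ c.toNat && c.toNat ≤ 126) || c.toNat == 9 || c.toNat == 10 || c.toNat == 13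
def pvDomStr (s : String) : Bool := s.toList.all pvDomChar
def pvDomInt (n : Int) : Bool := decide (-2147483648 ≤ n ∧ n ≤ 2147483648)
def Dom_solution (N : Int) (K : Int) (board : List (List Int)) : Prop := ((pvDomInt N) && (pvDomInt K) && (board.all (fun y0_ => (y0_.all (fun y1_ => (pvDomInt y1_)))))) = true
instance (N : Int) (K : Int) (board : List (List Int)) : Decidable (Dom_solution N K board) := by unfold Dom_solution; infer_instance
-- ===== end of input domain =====

-- B counts word slots by a direct window scan (for each start position, test K ones with
-- non-1/border neighbours on both sides) instead of A's streaming run counter; same result, different algorithm.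

-- zip(*board) as both Python sources compute it (truncated to the shortest row; tuples read back as lists)
def pyZip (b : List (List Int)) : List (List Int) :=
  match b with
  | [] => []
  | r0 :: rs =>
    (List.range (rs.foldl (fun m r => min m r.length) r0.length)).map
      (fun i => b.map (fun r => r.getD i 0))

-- ===== PORT A =====
-- "if possible == K: counter += 1" (A performs this both on a run break and at end of line)
def bumpIfK (K : Int) (cp : Int × Int) : Int :=
  if cp.2 = K then cp.1 + 1 else cp.1

def lineStepA (K : Int) (cp : Int × Int) (x : Int) : Int × Int :=
  if x = 1 then (cp.1, cp.2 + 1)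
  else (bumpIfK K cp, 0)

def countA (N K : Int) (b : List (List Int)) : Int :=
  b.foldl (fun counter line =>
    bumpIfK K ((PySem.List.pyRange 0 N 1).foldl
      (fun cp idx => lineStepA K cp (PySem.List.pyGetD line idx 0)) (counter, 0))) 0

def solution (N : Int) (K : Int) (board : List (List Int)) : Int :=
  countA N K board + countA N K (pyZip board)

-- ===== PORT B =====
-- fits(line): count start positions i whose K-cell window is all 1s with a border or non-1 on each side
def fitsB (N K : Int) (line : List Int) : Int :=
  (PySem.List.pyRange 0 (N - K + 1) 1).foldl
    (fun total i =>
      if ((PySem.List.pyRange 0 K 1).all fun j => PySem.List.pyGetD line (i + j) 0 == 1)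
          && (i == 0 || !(PySem.List.pyGetD line (i - 1) 0 == 1))
          && (i + K == N || !(PySem.List.pyGetD line (i + K) 0 == 1))
      then total + 1 else total) 0

def solution_alt (N : Int) (K : Int) (board : List (List Int)) : Int :=
  (board.map (fitsB N K)).sum + ((pyZip board).map (fitsB N K)).sum

-- ===== PRECONDITION & SPEC =====
-- Pre_ excludes (a) the inputs where A raises IndexError (0 ≤ N but some row, or the column height,
-- is shorter than N), and (b) negative word lengths K < 0 and the doubly degenerate K = 0 with N < 0,
-- corners no specification of the task covers: for K < 0 A returns a constant 0 while B's window scan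
-- raises IndexError or counts empty windows, and for K = 0 with N < 0 A counts one empty word per line
-- and per row while reading no cell at all — neither value is the specified one, nothing is claimed there.
def Pre_solution (N : Int) (K : Int) (board : List (List Int)) : Prop :=
  (0 ≤ N → ((∀ r ∈ board, N ≤ (r.length : Int)) ∧ (board ≠ [] → N ≤ (board.length : Int)))) ∧
  (1 ≤ K ∨ (K = 0 ∧ 0 ≤ N))
instance (N : Int) (K : Int) (board : List (List Int)) : Decidable (Pre_solution N K board) := by unfold Pre_solution; infer_instance

def pvWitness_solution : Int × Int × List (List Int) := (2, 1, [[1, 0], [1, 1]])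

def Spec_solution (N : Int) (K : Int) (board : List (List Int)) (out : Int) : Prop := out = solution_alt N K board
instance (N : Int) (K : Int) (board : List (List Int)) (out : Int) : Decidable (Spec_solution N K board out) := by unfold Spec_solution; infer_instance

-- ===== CLAIM (what is proved, stated in full; the proofs are below) =====
def Claim_equal_solution : Prop := ∀ (N : Int) (K : Int) (board : List (List Int)), Dom_solution N K board → Pre_solution N K board → Spec_solution N K board (solution N K board)

-- ===== LEMMAS AND PROOFS =====

-- runs[-1] += 1 on a list (proof-side model of A's running counter as a run-length list)
def incrLast : List Int → List Int
  | [] => []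
  | [x] => [x + 1]
  | x :: y :: xs => x :: incrLast (y :: xs)

-- one step of the run-length decomposition
def runStep (runs : List Int) (x : Int) : List Int :=
  if x = 1 then incrLast runs else runs ++ [0]

-- length of the leading run of 1s
def leadOnes : List Int → Nat
  | [] => 0
  | x :: xs => if x = 1 then leadOnes xs + 1 else 0

-- structural count of valid window starts: a maximal run of exactly K ones starts here
def bcount (K : Int) (prev : Bool) : List Int → Nat
  | [] => 0
  | x :: xs => (if prev = false ∧ (leadOnes (x :: xs) : Int) = K then 1 else 0) + bcount K (x == 1) xs

-- index form of the same predicate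
def validB (K : Int) (prev : Bool) (cells : List Int) (i : Nat) : Bool :=
  ((leadOnes (cells.drop i) : Int) == K) && (if i = 0 then !prev else !(cells.getD (i - 1) 0 == 1))

theorem incrLast_cons (x : Int) (xs : List Int) (h : xs ≠ []) :
    incrLast (x :: xs) = x :: incrLast xs := by
  cases xs with
  | nil => exact absurd rfl h
  | cons y ys => rfl

theorem incrLast_append (rs ps : List Int) (h : ps ≠ []) :
    incrLast (rs ++ ps) = rs ++ incrLast ps := by
  induction rs with
  | nil => rfl
  | cons x rs ih =>
    rw [List.cons_append, incrLast_cons x (rs ++ ps) (by simp [h]), ih, List.cons_append]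

theorem incrLast_ne_nil (ps : List Int) (h : ps ≠ []) : incrLast ps ≠ [] := by
  cases ps with
  | nil => exact absurd rfl h
  | cons x xs => cases xs <;> simp [incrLast]

theorem runsFold_append (cells rs ps : List Int) (h : ps ≠ []) :
    cells.foldl runStep (rs ++ ps) = rs ++ cells.foldl runStep ps := by
  induction cells generalizing ps with
  | nil => rfl
  | cons x xs ih =>
    simp only [List.foldl_cons, runStep]
    by_cases hx : x = 1
    · rw [if_pos hx, if_pos hx, incrLast_append rs ps h, ih _ (incrLast_ne_nil ps h)]
    · rw [if_neg hx, if_neg hx, List.append_assoc, ih _ (by simp)]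

theorem core_line (K : Int) (cells : List Int) (c p : Int) :
    bumpIfK K (cells.foldl (lineStepA K) (c, p))
    = c + ((cells.foldl runStep [p]).count K : Int) := by
  induction cells generalizing c p with
  | nil =>
    simp only [List.foldl_nil, bumpIfK, List.count_singleton']
    by_cases hp : p = K <;> simp [hp]
  | cons x xs ih =>
    simp only [List.foldl_cons, lineStepA, runStep]
    by_cases hx : x = 1
    · rw [if_pos hx, if_pos hx]
      exact ih c (p + 1)
    · rw [if_neg hx, if_neg hx, runsFold_append xs [p] [0] (by simp), List.count_append,
        ih (bumpIfK K (c, p)) 0]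
      simp only [bumpIfK, List.count_singleton']
      by_cases hp : p = K <;> simp [hp] <;> omega

theorem line_eq (N K : Int) (line : List Int) (c : Int)
    (hlen : 0 ≤ N → N ≤ (line.length : Int)) :
    bumpIfK K ((PySem.List.pyRange 0 N 1).foldl
        (fun cp idx => lineStepA K cp (PySem.List.pyGetD line idx 0)) (c, 0))
    = c + (((line.take N.toNat).foldl runStep [0]).count K : Int) := by
  by_cases hN : 0 ≤ N
  case neg =>
    rw [PySem.List.pyRange_one_eq_nil (by omega), show N.toNat = 0 by omega]
    simp only [List.take_zero, List.foldl_nil, bumpIfK, List.count_singleton']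
    by_cases hK : (0 : Int) = K <;> simp [hK]
  have hlen := hlen hN
  have hcells : (line.take N.toNat).length = N.toNat := by
    simp [List.length_take]; omega
  have hrange : PySem.List.pyRange 0 N 1
      = PySem.List.pyRange 0 ((line.take N.toNat).length : Int) 1 := by
    rw [hcells]; congr 1; omega
  have hcongr : (PySem.List.pyRange 0 ((line.take N.toNat).length : Int) 1).foldl
      (fun cp idx => lineStepA K cp (PySem.List.pyGetD line idx 0)) (c, 0)
      = (PySem.List.pyRange 0 ((line.take N.toNat).length : Int) 1).foldl
      (fun cp idx => lineStepA K cp (PySem.List.pyGetD (line.take N.toNat) idx 0)) (c, 0) := by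
    apply PySem.List.foldl_congr_mem
    intro acc idx hmem
    obtain ⟨h0, hlt⟩ := PySem.List.mem_pyRange_one.mp hmem
    have hcast : idx = ((idx.toNat : Nat) : Int) := by omega
    rw [hcast, PySem.List.pyGetD_natCast, PySem.List.pyGetD_natCast]
    have hi : idx.toNat < N.toNat := by omega
    rw [show (List.take N.toNat line).getD idx.toNat 0 = line.getD idx.toNat 0 by
      simp [List.getD_eq_getElem?_getD, hi]]
  rw [hrange, hcongr,
    PySem.List.foldl_pyRange_zero_pyGetD' (line.take N.toNat) 0 (fun cp x => lineStepA K cp x) ((c, 0) : Int × Int)]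
  exact core_line K (line.take N.toNat) c 0

theorem countA_eq (N K : Int) (lines : List (List Int)) (c : Int)
    (hlen : ∀ line ∈ lines, 0 ≤ N → N ≤ (line.length : Int)) :
    lines.foldl (fun counter line =>
      bumpIfK K ((PySem.List.pyRange 0 N 1).foldl
        (fun cp idx => lineStepA K cp (PySem.List.pyGetD line idx 0)) (counter, 0))) c
    = c + (lines.map (fun line => ((((line.take N.toNat).foldl runStep [0]).count K : Nat) : Int))).sum := by
  induction lines generalizing c with
  | nil => simp
  | cons l ls ih =>
    simp only [List.foldl_cons, List.map_cons, List.sum_cons]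
    rw [line_eq N K l c (hlen l (by simp)), ih _ (fun x hx => hlen x (by simp [hx]))]
    ring

theorem leadOnes_le (l : List Int) : leadOnes l ≤ l.length := by
  induction l with
  | nil => simp [leadOnes]
  | cons x xs ih =>
    simp only [leadOnes, List.length_cons]
    by_cases hx : x = 1 <;> simp [hx] <;> omega

-- exact leading-run characterisation
theorem leadOnes_cons_one (xs : List Int) : leadOnes (1 :: xs) = leadOnes xs + 1 := by
  simp [leadOnes]

theorem leadOnes_cons_ne (x : Int) (xs : List Int) (hx : x ≠ 1) : leadOnes (x :: xs) = 0 := by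
  simp [leadOnes, hx]

theorem leadOnes_eq_iff (l : List Int) (k : Nat) :
    leadOnes l = k ↔ ((∀ j < k, l.getD j 0 = 1) ∧ ¬(k < l.length ∧ l.getD k 0 = 1)) := by
  induction l generalizing k with
  | nil =>
    cases k with
    | zero => simp [leadOnes]
    | succ k =>
      constructor
      · intro h; simp [leadOnes] at h
      · rintro ⟨h1, _⟩
        have := h1 0 (by omega)
        simp at this
  | cons x xs ih =>
    by_cases hx : x = 1
    · subst hx
      rw [leadOnes_cons_one]
      cases k with
      | zero =>
        constructor
        · intro h; omega
        · rintro ⟨_, h2⟩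
          exact absurd ⟨by simp, by simp⟩ h2
      | succ k =>
        rw [show (leadOnes xs + 1 = k + 1) ↔ leadOnes xs = k by omega, ih k]
        constructor
        · rintro ⟨h1, h2⟩
          refine ⟨?_, ?_⟩
          · intro j hj
            cases j with
            | zero => simp
            | succ j => simpa using h1 j (by omega)
          · rintro ⟨ha, hb⟩
            exact h2 ⟨by simpa using ha, by simpa using hb⟩
        · rintro ⟨h1, h2⟩
          refine ⟨fun j hj => by simpa using h1 (j + 1) (by omega), ?_⟩
          rintro ⟨ha, hb⟩
          exact h2 ⟨by simpa using ha, by simpa using hb⟩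
    · rw [leadOnes_cons_ne x xs hx]
      cases k with
      | zero =>
        constructor
        · rintro _
          refine ⟨by omega, ?_⟩
          rintro ⟨_, h⟩
          rw [List.getD_cons_zero] at h
          exact hx h
        · intro _; rfl
      | succ k =>
        constructor
        · intro h; omega
        · rintro ⟨h1, _⟩
          have := h1 0 (by omega)
          rw [List.getD_cons_zero] at this
          exact absurd this hx

-- run-length list vs window-start count: the central invariant
theorem runs_count_eq_bcount (K : Int) (hK : 1 ≤ K) (cells : List Int) (p : Int) (hp : 0 ≤ p) :
    (cells.foldl runStep [p]).count K
    = bcount K (decide (1 ≤ p)) cells + (if 1 ≤ p ∧ p + (leadOnes cells : Int) = K then 1 else 0) := by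
  induction cells generalizing p with
  | nil =>
    rw [List.foldl_nil, show bcount K (decide (1 ≤ p)) [] = 0 from rfl,
      show leadOnes [] = 0 from rfl, List.count_singleton']
    by_cases hp1 : p = K
    · rw [if_pos (by simpa using hp1), if_pos ⟨by omega, by push_cast; omega⟩]
    · rw [if_neg (by simpa using hp1), if_neg (by push_neg; intro _; push_cast; omega)]
  | cons x xs ih =>
    rw [List.foldl_cons, runStep]
    by_cases hx : x = 1
    · subst hx
      rw [if_pos rfl, show incrLast [p] = [p + 1] from rfl, ih (p + 1) (by omega),
        decide_eq_true (by omega : (1:Int) ≤ p + 1)]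
      simp only [bcount, leadOnes_cons_one, beq_self_eq_true]
      by_cases hp1 : 1 ≤ p
      · rw [show decide (1 ≤ p) = true from by simpa using hp1,
          if_neg (by simp : ¬(true = false ∧ ((leadOnes xs + 1 : Nat) : Int) = K))]
        have hiff : (1 ≤ p + 1 ∧ p + 1 + (leadOnes xs : Int) = K)
            ↔ (1 ≤ p ∧ p + ((leadOnes xs + 1 : Nat) : Int) = K) := by push_cast; omega
        rw [if_congr hiff rfl rfl]
        omega
      · have hp0 : p = 0 := by omega
        subst hp0
        rw [show decide ((1:Int) ≤ 0) = false from by decide,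
          if_neg (by push_neg; intro h; omega : ¬((1:Int) ≤ 0 ∧ (0:Int) + ((leadOnes xs + 1 : Nat) : Int) = K))]
        by_cases hc : (0:Int) + 1 + (leadOnes xs : Int) = K
        · rw [if_pos ⟨by omega, hc⟩, if_pos ⟨rfl, by push_cast at hc ⊢; omega⟩]
          omega
        · rw [if_neg (by push_neg; intro _; omega), if_neg (by push_neg; intro _; push_cast at hc ⊢; omega)]
          omega
    · rw [if_neg hx, runsFold_append xs [p] [0] (by simp), List.count_append, ih 0 (by omega),
        show decide ((1:Int) ≤ 0) = false from by decide, List.count_singleton']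
      simp only [bcount, leadOnes_cons_ne x xs hx, show (x == 1) = false from by simpa using hx]
      rw [if_neg (by push_neg; intro h; omega : ¬((1:Int) ≤ 0 ∧ (0:Int) + (leadOnes xs : Int) = K)),
        if_neg (by rintro ⟨_, h⟩; push_cast at h; omega : ¬(decide (1 ≤ p) = false ∧ ((0:Nat) : Int) = K))]
      by_cases hp1 : p = K
      · rw [if_pos (by simpa using hp1), if_pos ⟨by omega, by push_cast; omega⟩]
        omega
      · rw [if_neg (by simpa using hp1), if_neg (by push_neg; intro _; push_cast; omega)]
        omega

theorem bcount_eq_countP (K : Int) (prev : Bool) (cells : List Int) :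
    bcount K prev cells = (List.range cells.length).countP (validB K prev cells) := by
  induction cells generalizing prev with
  | nil => simp [bcount]
  | cons x xs ih =>
    rw [show (x :: xs).length = xs.length + 1 from rfl, List.range_succ_eq_map, List.countP_cons,
      List.countP_map]
    have hz : (validB K prev (x :: xs) 0 = true) ↔ (prev = false ∧ (leadOnes (x :: xs) : Int) = K) := by
      simp [validB]
      tauto
    have ht : ∀ i, (validB K prev (x :: xs) ∘ Nat.succ) i = validB K (x == 1) xs i := by
      intro i
      simp only [Function.comp, validB, List.drop_succ_cons]
      congr 1
      cases i with
      | zero => simp [List.getD]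
      | succ i => simp [List.getD]
    rw [List.countP_congr (fun a _ => by rw [ht a])]
    simp only [bcount, ih]
    by_cases hc : prev = false ∧ (leadOnes (x :: xs) : Int) = K
    · rw [if_pos hc, if_pos (hz.mpr hc)]; omega
    · rw [if_neg hc, if_neg (fun h => hc (hz.mp h))]; omega

theorem countP_range_mono (p : Nat → Bool) (n m : Nat) (hnm : n ≤ m)
    (h : ∀ i, p i = true → i < n) :
    (List.range m).countP p = (List.range n).countP p := by
  induction m with
  | zero => rw [Nat.le_zero.mp hnm]
  | succ m ih =>
    by_cases hc : n = m + 1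
    · rw [hc]
    · have hnm' : n ≤ m := by omega
      rw [List.range_succ, List.countP_append, ih hnm']
      have : p m = false := by
        cases hpm : p m with
        | false => rfl
        | true => exact absurd (h m hpm) (by omega)
      simp [this]

-- the per-line bridge: B's window scan equals the count of K-runs in A's run decomposition
theorem fitsB_eq (N K : Int) (hK : 1 ≤ K) (line : List Int)
    (hlen : 0 ≤ N → N ≤ (line.length : Int)) :
    fitsB N K line = ((((line.take N.toNat).foldl runStep [0]).count K : Nat) : Int) := by
  have hcells_le : (line.take N.toNat).length ≤ N.toNat := by
    rw [List.length_take]; exact min_le_left _ _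
  have hrhs : (((line.take N.toNat).foldl runStep [0]).count K : Nat)
      = (List.range (line.take N.toNat).length).countP (validB K false (line.take N.toNat)) := by
    rw [runs_count_eq_bcount K hK _ 0 le_rfl]
    rw [show decide (1 ≤ (0:Int)) = false by decide,
      if_neg (by push_neg; intro h; omega : ¬(1 ≤ (0:Int) ∧ (0:Int) + (leadOnes (line.take N.toNat) : Int) = K))]
    rw [bcount_eq_countP]; omega
  by_cases hKN : N - K + 1 ≤ 0
  · -- no window fits: the board side is empty and no run can reach length K
    rw [show fitsB N K line = 0 by
      unfold fitsB; rw [PySem.List.pyRange_one_eq_nil (show N - K + 1 ≤ 0 by omega)]; rfl]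
    rw [hrhs, List.countP_eq_zero.mpr, Nat.cast_zero]
    intro i hi
    simp only [validB, Bool.and_eq_true, beq_iff_eq] at *
    rintro ⟨h1, _⟩
    have := leadOnes_le ((line.take N.toNat).drop i)
    simp only [List.length_drop] at this
    omega
  · push_neg at hKN
    have hN : 0 ≤ N := by omega
    have hlenN : N ≤ (line.length : Int) := hlen hN
    have hcl : (line.take N.toNat).length = N.toNat := by
      simp [List.length_take]; omega
    -- B's fold is a countP over the Int range, then over the Nat range
    unfold fitsB
    rw [PySem.List.foldl_if_add_one, PySem.List.pyRange_one 0 (N - K + 1), List.countP_map, zero_add,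
      show (N - K + 1 - 0) = N - K + 1 by ring]
    rw [hrhs, hcl]
    rw [countP_range_mono (validB K false (line.take N.toNat)) (N - K + 1).toNat N.toNat
      (by omega)
      (by
        intro i hi
        simp only [validB, Bool.and_eq_true, beq_iff_eq] at hi
        have := leadOnes_le ((line.take N.toNat).drop i)
        simp only [List.length_drop, hcl] at this
        omega)]
    rw [Nat.cast_inj]
    apply List.countP_congr
    intro i hi
    rw [List.mem_range] at hi
    have hiK : (i : Int) + K ≤ N := by omega
    -- unfold both predicates to arithmetic on line
    have hget : ∀ m : Nat, (m : Int) < N → PySem.List.pyGetD line (m : Int) 0 = (line.take N.toNat).getD m 0 := by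
      intro m hm
      rw [PySem.List.pyGetD_natCast]
      have : m < N.toNat := by omega
      simp [List.getD_eq_getElem?_getD, this]
    have hdrop : ∀ j : Nat, ((line.take N.toNat).drop i).getD j 0 = (line.take N.toNat).getD (i + j) 0 := by
      intro j
      simp [List.getD_eq_getElem?_getD, List.getElem?_drop]
    simp only [Function.comp]
    -- left-hand predicate: B's condition at index (0 + i)
    rw [show ((0:Int) + (i:Int)) = (i:Int) by ring]
    have hall : ((PySem.List.pyRange 0 K 1).all fun j => PySem.List.pyGetD line ((i:Int) + j) 0 == 1)
        = decide (∀ j < K.toNat, (line.take N.toNat).getD (i + j) 0 = 1) := by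
      by_cases hw : ∀ j < K.toNat, (line.take N.toNat).getD (i + j) 0 = 1
      · rw [decide_eq_true hw, List.all_eq_true]
        intro j hj
        obtain ⟨hj0, hjK⟩ := PySem.List.mem_pyRange_one.mp hj
        have hjc : ((i:Int) + j) = ((i + j.toNat : Nat) : Int) := by push_cast; omega
        rw [beq_iff_eq, hjc, hget _ (by push_cast; omega)]
        exact hw j.toNat (by omega)
      · rw [decide_eq_false hw]
        push_neg at hw
        obtain ⟨j, hjK, hj1⟩ := hw
        rw [List.all_eq_false]
        refine ⟨(j : Int), PySem.List.mem_pyRange_one.mpr ⟨by omega, by omega⟩, ?_⟩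
        intro hcon
        rw [beq_iff_eq, show ((i:Int) + (j:Int)) = ((i + j : Nat) : Int) by push_cast; ring,
          hget _ (by push_cast; omega)] at hcon
        exact hj1 hcon
    rw [hall]
    -- validB's first factor via leadOnes_eq_iff
    have hvb : ((leadOnes ((line.take N.toNat).drop i) : Int) == K)
        = (decide (∀ j < K.toNat, (line.take N.toNat).getD (i + j) 0 = 1)
           && (((i:Int) + K == N) || !((line.take N.toNat).getD (i + K.toNat) 0 == 1))) := by
      have hchar := leadOnes_eq_iff ((line.take N.toNat).drop i) K.toNat
      simp only [List.length_drop, hcl, hdrop] at hchar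
      by_cases hlead : leadOnes ((line.take N.toNat).drop i) = K.toNat
      · obtain ⟨h1, h2⟩ := hchar.mp hlead
        rw [show ((leadOnes ((line.take N.toNat).drop i) : Int) == K) = true by
          rw [beq_iff_eq, hlead]; omega]
        rw [decide_eq_true h1]
        by_cases hb : (i:Int) + K = N
        · simp [hb]
        · have hKlt : K.toNat < N.toNat - i := by omega
          have := fun h => h2 ⟨hKlt, h⟩
          rw [List.getD_eq_getElem?_getD] at this
          simp only [Bool.true_and]
          rw [show ((i:Int) + K == N) = false by simpa using hb]
          simp only [Bool.false_or, Bool.true_eq, Bool.not_eq_true', beq_eq_false_iff_ne]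
          exact this
      · rw [show ((leadOnes ((line.take N.toNat).drop i) : Int) == K) = false by
          rw [beq_eq_false_iff_ne]; intro h; apply hlead; omega]
        rw [not_iff_not.mpr hchar] at hlead
        push_neg at hlead
        by_cases h1 : ∀ j < K.toNat, (line.take N.toNat).getD (i + j) 0 = 1
        · obtain ⟨hKlt, hKone⟩ := hlead h1
          rw [decide_eq_true h1]
          rw [show ((i:Int) + K == N) = false by rw [beq_eq_false_iff_ne]; omega]
          rw [List.getD_eq_getElem?_getD] at hKone
          simp [hKone]
        · simp [decide_eq_false h1]
    rw [validB, hvb]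
    -- remaining: align the left-boundary factor and the ordering of conjuncts
    have hleft : ((i:Int) == 0 || !(PySem.List.pyGetD line ((i:Int) - 1) 0 == 1))
        = (if i = 0 then !false else !((line.take N.toNat).getD (i - 1) 0 == 1)) := by
      cases i with
      | zero => simp
      | succ m =>
        rw [show (((m+1 : Nat):Int) == 0) = false by rw [beq_eq_false_iff_ne]; omega]
        rw [show (((m+1 : Nat):Int) - 1) = ((m : Nat) : Int) by push_cast; ring,
          hget m (by omega)]
        simp
    have hright : ((i:Int) + K == N || !(PySem.List.pyGetD line ((i:Int) + K) 0 == 1))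
        = (((i:Int) + K == N) || !((line.take N.toNat).getD (i + K.toNat) 0 == 1)) := by
      by_cases hb : (i:Int) + K = N
      · simp [hb]
      · rw [show ((i:Int) + K) = ((i + K.toNat : Nat) : Int) by push_cast; omega,
          hget (i + K.toNat) (by push_cast; omega)]
    rw [hleft, hright]
    cases hd : decide (∀ j < K.toNat, (line.take N.toNat).getD (i + j) 0 = 1) <;>
      cases hb : (((i:Int) + K == N) || !((line.take N.toNat).getD (i + K.toNat) 0 == 1)) <;>
      cases hl : (if i = 0 then !false else !((line.take N.toNat).getD (i - 1) 0 == 1)) <;> simp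

-- K = 0: the empty word sits in every empty maximal run (one per boundary pair)
def zcount (prev : Bool) : List Int → Nat
  | [] => if prev then 0 else 1
  | x :: xs => (if prev = false ∧ x ≠ 1 then 1 else 0) + zcount (x == 1) xs

def valid0 (prev : Bool) (cells : List Int) (i : Nat) : Bool :=
  (if i = 0 then !prev else !(cells.getD (i - 1) 0 == 1))
    && ((i == cells.length) || !(cells.getD i 0 == 1))

theorem runs_count_zero_eq_zcount (cells : List Int) (p : Int) (hp : 0 ≤ p) :
    (cells.foldl runStep [p]).count 0 = zcount (decide (1 ≤ p)) cells := by
  induction cells generalizing p with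
  | nil =>
    rw [List.foldl_nil, List.count_singleton', zcount]
    by_cases hp1 : 1 ≤ p
    · rw [if_neg (by omega : ¬ p = 0), show decide (1 ≤ p) = true from by simpa using hp1]
      rfl
    · rw [if_pos (by omega : p = 0), show decide (1 ≤ p) = false from by simpa using hp1]
      rfl
  | cons x xs ih =>
    rw [List.foldl_cons, runStep]
    by_cases hx : x = 1
    · subst hx
      rw [if_pos rfl, show incrLast [p] = [p + 1] from rfl, ih (p + 1) (by omega),
        decide_eq_true (by omega : (1:Int) ≤ p + 1), zcount]
      rw [if_neg (by rintro ⟨_, h⟩; exact h rfl), beq_self_eq_true]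
      omega
    · rw [if_neg hx, runsFold_append xs [p] [0] (by simp), List.count_append, ih 0 (by omega),
        show decide ((1:Int) ≤ 0) = false from by decide, List.count_singleton', zcount,
        show (x == 1) = false from by simpa using hx]
      by_cases hp1 : 1 ≤ p
      · rw [if_neg (by omega : ¬ p = 0),
          if_neg (by
            rintro ⟨h, _⟩
            rw [show decide (1 ≤ p) = true from by simpa using hp1] at h
            cases h)]
      · rw [if_pos (by omega : p = 0),
          if_pos ⟨by simpa using hp1, hx⟩]

theorem zcount_eq_countP (prev : Bool) (cells : List Int) :
    zcount prev cells = (List.range (cells.length + 1)).countP (valid0 prev cells) := by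
  induction cells generalizing prev with
  | nil =>
    cases prev <;> rfl
  | cons x xs ih =>
    rw [show (x :: xs).length + 1 = (xs.length + 1) + 1 from rfl, List.range_succ_eq_map,
      List.countP_cons, List.countP_map]
    have ht : ∀ i, (valid0 prev (x :: xs) ∘ Nat.succ) i = valid0 (x == 1) xs i := by
      intro i
      cases i with
      | zero =>
        have hcomm : (xs.length == 0) = (0 == xs.length) := by cases hxe : xs.length <;> simp
        simp [valid0, hcomm]
      | succ m => simp [valid0, eq_comm]
    rw [List.countP_congr (fun a _ => by rw [ht a]), ← ih (x == 1), zcount]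
    have hz : (valid0 prev (x :: xs) 0 = true) ↔ (prev = false ∧ x ≠ 1) := by
      simp [valid0, Bool.not_eq_true']
    by_cases hc : prev = false ∧ x ≠ 1
    · rw [if_pos hc, if_pos (hz.mpr hc)]; omega
    · rw [if_neg hc, if_neg (fun h => hc (hz.mp h))]; omega

theorem fitsB_eq_zero (N : Int) (hN : 0 ≤ N) (line : List Int)
    (hlen : N ≤ (line.length : Int)) :
    fitsB N 0 line = ((((line.take N.toNat).foldl runStep [0]).count 0 : Nat) : Int) := by
  have hcl : (line.take N.toNat).length = N.toNat := by
    simp [List.length_take]; omega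
  rw [runs_count_zero_eq_zcount _ 0 le_rfl, show decide ((1:Int) ≤ 0) = false from by decide,
    zcount_eq_countP, hcl]
  unfold fitsB
  rw [PySem.List.foldl_if_add_one, PySem.List.pyRange_one 0 (N - 0 + 1), List.countP_map, zero_add,
    show (N - 0 + 1 - 0).toNat = N.toNat + 1 by omega, Nat.cast_inj]
  apply List.countP_congr
  intro i hi
  rw [List.mem_range] at hi
  have hget : ∀ m : Nat, (m : Int) < N → PySem.List.pyGetD line (m : Int) 0 = (line.take N.toNat).getD m 0 := by
    intro m hm
    rw [PySem.List.pyGetD_natCast]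
    have : m < N.toNat := by omega
    simp [List.getD_eq_getElem?_getD, this]
  simp only [Function.comp]
  rw [show ((0:Int) + (i:Int)) = (i:Int) by ring,
    show PySem.List.pyRange 0 0 1 = [] from PySem.List.pyRange_one_eq_nil le_rfl,
    show (([] : List Int).all fun j => PySem.List.pyGetD line ((i:Int) + j) 0 == 1) = true from rfl,
    Bool.true_and]
  have hleft : ((i:Int) == 0 || !(PySem.List.pyGetD line ((i:Int) - 1) 0 == 1))
      = (if i = 0 then !false else !((line.take N.toNat).getD (i - 1) 0 == 1)) := by
    cases i with
    | zero => simp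
    | succ m =>
      rw [show (((m+1 : Nat):Int) == 0) = false from by rw [beq_eq_false_iff_ne]; omega]
      rw [show (((m+1 : Nat):Int) - 1) = ((m : Nat) : Int) by push_cast; ring,
        hget m (by omega)]
      simp
  have hright : ((i:Int) + 0 == N || !(PySem.List.pyGetD line ((i:Int) + 0) 0 == 1))
      = ((i == N.toNat) || !((line.take N.toNat).getD i 0 == 1)) := by
    by_cases hb : i = N.toNat
    · rw [show ((i:Int) + 0 == N) = true from by rw [beq_iff_eq]; omega,
        show (i == N.toNat) = true from by simpa using hb]
      rfl
    · rw [show ((i:Int) + 0 == N) = false from by rw [beq_eq_false_iff_ne]; omega,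
        show (i == N.toNat) = false from by simpa using hb,
        show ((i:Int) + 0) = ((i : Nat) : Int) by ring, hget i (by omega)]
  rw [hleft, hright]
  all_goals simp [valid0, hcl]

-- dispatch on the two admitted shapes of K
theorem fitsB_eq' (N K : Int) (hK : 1 ≤ K ∨ (K = 0 ∧ 0 ≤ N)) (line : List Int)
    (hlen : 0 ≤ N → N ≤ (line.length : Int)) :
    fitsB N K line = ((((line.take N.toNat).foldl runStep [0]).count K : Nat) : Int) := by
  rcases hK with hK | ⟨hK0, hN⟩
  · exact fitsB_eq N K hK line hlen
  · subst hK0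
    exact fitsB_eq_zero N hN line (hlen hN)

theorem pyZip_row_length (b : List (List Int)) (r : List Int) (hr : r ∈ pyZip b) :
    r.length = b.length := by
  cases b with
  | nil => simp [pyZip] at hr
  | cons r0 rs =>
    simp only [pyZip, List.mem_map, List.mem_range] at hr
    obtain ⟨i, _, rfl⟩ := hr
    simp

theorem pyZip_nil : pyZip [] = [] := rfl

-- ===== VERDICT (by name: the statement is the Claim_ definition above) =====
theorem solution_spec : Claim_equal_solution := by
  intro N K board _ hpre
  obtain ⟨hpreN, hK⟩ := hpre
  unfold Spec_solution solution solution_alt countA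
  rw [countA_eq N K board 0 (fun r hr hN => ((hpreN hN).1 r hr)),
      countA_eq N K (pyZip board) 0 ?_, zero_add, zero_add]
  · congr 1 <;> (apply congrArg; apply List.map_congr_left; intro l hl)
    · exact (fitsB_eq' N K hK l (fun hN => (hpreN hN).1 l hl)).symm
    · refine (fitsB_eq' N K hK l (fun hN => ?_)).symm
      rw [pyZip_row_length board l hl]
      apply (hpreN hN).2
      intro hb
      rw [hb, pyZip_nil] at hl
      simp at hl
  · intro line hline hN
    rw [pyZip_row_length board line hline]
    apply (hpreN hN).2
    intro hb
    rw [hb, pyZip_nil] at hline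
    simp at hline
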